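-- pv_equiv track=rewrite | github.com/abeerzreeke/aa | sortLetters.py | print_sort_words
-- ===== SOURCE A (Python) =====
-- def print_sort_words(sort_arr, ascii_str_old, txt):
--
--     new_txt = []
--     for i in range(len(sort_arr)):
--         value_asci = sort_arr[i]
--         index = ascii_str_old.index(value_asci)
--         new_txt.append(txt[index])
--         ascii_str_old[index] = ''
--
--     return ' '.join(new_txt)
-- ===== SOURCE B (Python) =====
-- def print_sort_words(sort_arr, ascii_str_old, txt):
--     # Sort-and-merge instead of repeated scans: stably sort the queries (with
--     # their output slots) and the (value, word) pairs by value, pair them off in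
--     # one linear merge, scattering each word into its query's slot.
--     # Return value only: unlike A, this does not mutate ascii_str_old.
--     queries = sorted(enumerate(sort_arr), key=lambda q: q[1])
--     entries = sorted(zip(ascii_str_old, txt), key=lambda e: e[0])
--     out = [''] * len(sort_arr)
--     qi = 0
--     ei = 0
--     while qi < len(queries):
--         i, v = queries[qi]
--         if entries[ei][0] < v:
--             ei += 1
--         else:
--             out[i] = entries[ei][1]
--             qi += 1
--             ei += 1
--     return ' '.join(out)
-- ===== Notes on version B (the rewrite author's own statement) =====
-- stated objective: faster
-- what changed: A repeatedly scans ascii_str_old with list.index and blanks consumed slots with a '' sentinel (quadratic); B instead stably sorts the indexed queries and the (value, word) pairs by value and pairs them off in a single two-pointer merge, scattering each word into its query's output slot; B does not mutate ascii_str_old (return value is what is compared).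
-- outside the precondition, e.g. on print_sort_words(['a', ''], ['a', 'b'], ['x', 'y']): A returns 'x x', B returns 'y x'; on print_sort_words(['a', ''], ['a', ''], ['x', 'y']): A returns 'x x', B returns 'x y'
import Mathlib
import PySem

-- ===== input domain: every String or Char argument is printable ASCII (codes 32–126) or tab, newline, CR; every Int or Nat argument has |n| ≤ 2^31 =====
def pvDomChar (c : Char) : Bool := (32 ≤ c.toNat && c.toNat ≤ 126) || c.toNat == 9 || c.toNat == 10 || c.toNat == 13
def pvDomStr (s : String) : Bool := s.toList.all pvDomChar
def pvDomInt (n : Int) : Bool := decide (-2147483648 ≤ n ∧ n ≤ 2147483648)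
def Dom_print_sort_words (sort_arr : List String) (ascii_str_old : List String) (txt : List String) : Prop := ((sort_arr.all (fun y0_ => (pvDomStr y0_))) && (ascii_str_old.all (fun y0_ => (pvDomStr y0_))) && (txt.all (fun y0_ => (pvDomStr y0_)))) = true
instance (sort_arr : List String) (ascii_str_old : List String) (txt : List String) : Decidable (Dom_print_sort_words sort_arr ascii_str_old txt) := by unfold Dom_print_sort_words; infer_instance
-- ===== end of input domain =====

-- B replaces A's quadratic scan-and-blank (repeated list.index + '' sentinel overwrite) by a
-- sort-and-merge: stably sort the indexed queries and the (value, word) pairs by value, pair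
-- them off in one linear two-pointer merge, scattering each word to its query's output slot.
-- Equivalence is about the RETURN value only: A mutates ascii_str_old in place, B does not.

-- ===== PORT A =====
-- the loop `for i in range(len(sort_arr))`: index = ascii.index(v); new_txt.append(txt[index]); ascii[index] = ''
-- (on ValueError/IndexError — excluded by Pre_ — the PySem primitives give none and we bail out)
def pvLoopA (queries : List String) (ascii : List String) (txt : List String) : List String :=
  match queries with
  | [] => []
  | v :: rest =>
    match PySem.List.index? ascii v with
    | none => []   -- ascii_str_old.index raises ValueError
    | some idx =>
      match PySem.List.pyGet? txt (idx : Int) with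
      | none => []   -- txt[index] raises IndexError
      | some w => w :: pvLoopA rest (ascii.set idx "") txt

def print_sort_words (sort_arr : List String) (ascii_str_old : List String) (txt : List String) : String :=
  PySem.Str.join " " (pvLoopA sort_arr ascii_str_old txt)

-- ===== PORT B =====
-- the merge loop `while qi < len(queries): i, v = queries[qi]; if entries[ei][0] < v: ei += 1
-- else: out[i] = entries[ei][1]; qi += 1; ei += 1` — the two cursors become the two list suffixes
def pvMergeB (q : List (Int × String)) (e : List (String × String)) (out : List String) : List String :=
  match q, e with
  | [], _ => out
  | _ :: _, [] => out   -- entries[ei] raises IndexError (excluded by Pre_)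
  | (i, v) :: qr, (a, w) :: er =>
    if a < v then pvMergeB ((i, v) :: qr) er out
    else pvMergeB qr er (PySem.List.pySetD out i w)
termination_by q.length + e.length
decreasing_by all_goals (simp; try omega)

def print_sort_words_alt (sort_arr : List String) (ascii_str_old : List String) (txt : List String) : String :=
  let queries := PySem.List.sorted (PySem.List.enumerate sort_arr) (fun p => p.2)
  let entries := PySem.List.sorted (ascii_str_old.zip txt) (fun p => p.1)
  PySem.Str.join " " (pvMergeB queries entries (List.replicate sort_arr.length ""))

-- ===== PRECONDITION & SPEC =====
-- the list of positions (ascending) at which v occurs in xs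
def pvOccPos (xs : List String) (v : String) : List Nat :=
  match xs with
  | [] => []
  | x :: r => if x = v then 0 :: (pvOccPos r v).map (· + 1) else (pvOccPos r v).map (· + 1)

def pvOkIdx (o : Option Nat) (n : Nat) : Bool :=
  match o with
  | none => false
  | some j => decide (j < n)

-- Pre_ excludes: (a) inputs where A raises (the k-th copy of a queried value is missing from
-- ascii_str_old → ValueError, or sits at an index ≥ len(txt) → IndexError), and (b) sort_arr
-- containing the empty string, which collides with A's consumed-slot sentinel '' (A then
-- accidentally re-matches already-consumed slots; B matches only original '' entries).
def Pre_print_sort_words (sort_arr : List String) (ascii_str_old : List String) (txt : List String) : Prop :=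
  "" ∉ sort_arr ∧
  ∀ i < sort_arr.length,
    pvOkIdx ((pvOccPos ascii_str_old (sort_arr.getD i ""))[(sort_arr.take i).count (sort_arr.getD i "")]?) txt.length = true

instance (sort_arr : List String) (ascii_str_old : List String) (txt : List String) : Decidable (Pre_print_sort_words sort_arr ascii_str_old txt) := by unfold Pre_print_sort_words; infer_instance

def pvWitness_print_sort_words : List String × List String × List String :=
  (["a", "b", "a"], ["b", "a", "a"], ["x", "y", "z"])

def Spec_print_sort_words (sort_arr : List String) (ascii_str_old : List String) (txt : List String) (out : String) : Prop := out = print_sort_words_alt sort_arr ascii_str_old txt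
instance (sort_arr : List String) (ascii_str_old : List String) (txt : List String) (out : String) : Decidable (Spec_print_sort_words sort_arr ascii_str_old txt out) := by unfold Spec_print_sort_words; infer_instance

-- ===== CLAIM (what is proved, stated in full; the proofs are below) =====
def Claim_equal_print_sort_words : Prop := ∀ (sort_arr : List String) (ascii_str_old : List String) (txt : List String), Dom_print_sort_words sort_arr ascii_str_old txt → Pre_print_sort_words sort_arr ascii_str_old txt → Spec_print_sort_words sort_arr ascii_str_old txt (print_sort_words sort_arr ascii_str_old txt)

-- ===== LEMMAS AND PROOFS =====

--------------------------------------------------------------------------------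
-- The common reference: the word assigned to query index i is txt[occ(v_i)[k_i]]
-- where v_i = sort_arr[i] and k_i = number of earlier queries with the same value.
--------------------------------------------------------------------------------

theorem pvOccPos_cons_self (x : String) (r : List String) :
    pvOccPos (x :: r) x = 0 :: (pvOccPos r x).map (· + 1) := by simp [pvOccPos]

theorem pvOccPos_cons_ne {x v : String} (r : List String) (h : x ≠ v) :
    pvOccPos (x :: r) v = (pvOccPos r v).map (· + 1) := by simp [pvOccPos, h]

--------------------------------------------------------------------------------
-- A-side: pvLoopA on a partially-blanked list computes the reference words
--------------------------------------------------------------------------------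

def pvRefLoop (rest : List String) (t : String → Nat) (ascii txt : List String) : List String :=
  match rest with
  | [] => []
  | v :: r =>
    match (pvOccPos ascii v)[t v]? with
    | none => []
    | some j =>
      match txt[j]? with
      | none => []
      | some w => w :: pvRefLoop r (fun u => if u = v then t u + 1 else t u) ascii txt

-- A's ascii_str_old after some iterations: for each v, its first (t v) occurrences are blanked to ''
def pvMask (xs : List String) (t : String → Nat) : List String :=
  match xs with
  | [] => []
  | x :: r => (if 0 < t x then "" else x) :: pvMask r (fun v => if v = x then t v - 1 else t v)

theorem pvMask_cons (x : String) (r : List String) (t : String → Nat) :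
    pvMask (x :: r) t = (if 0 < t x then "" else x) :: pvMask r (fun v => if v = x then t v - 1 else t v) := rfl

theorem pvMask_zero (xs : List String) : pvMask xs (fun _ => 0) = xs := by
  induction xs with
  | nil => rfl
  | cons x r ih => simpa [pvMask] using ih

theorem pvIndex_mask {v : String} (hv : v ≠ "") (xs : List String) (t : String → Nat) :
    PySem.List.index? (pvMask xs t) v = (pvOccPos xs v)[t v]? := by
  induction xs generalizing t with
  | nil => simp [pvMask, pvOccPos, PySem.List.index?_eq_idxOf?, List.idxOf?]
  | cons x r ih =>
    by_cases hx : x = v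
    · subst hx
      by_cases ht : 0 < t x
      · have hne : (if 0 < t x then "" else x) ≠ x := by rw [if_pos ht]; exact Ne.symm hv
        rw [pvMask_cons, PySem.List.index?_cons_of_ne _ hne, ih, pvOccPos_cons_self]
        rcases Nat.exists_eq_add_of_lt ht with ⟨k, hk0⟩
        have hk : t x = k + 1 := by omega
        rw [if_pos rfl, hk]
        simp
      · have h0 : t x = 0 := Nat.eq_zero_of_not_pos ht
        rw [pvMask_cons, if_neg ht, PySem.List.index?_cons_self, pvOccPos_cons_self, h0]
        simp
    · have hne : (if 0 < t x then "" else x) ≠ v := by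
        split
        · exact Ne.symm hv
        · exact hx
      rw [pvMask_cons, PySem.List.index?_cons_of_ne _ hne, ih, pvOccPos_cons_ne r hx]
      rw [if_neg (show ¬ v = x from fun hh => hx hh.symm)]
      simp

theorem pvSet_mask {v : String} (hv : v ≠ "") (xs : List String) (t : String → Nat) (j : Nat)
    (hj : (pvOccPos xs v)[t v]? = some j) :
    (pvMask xs t).set j "" = pvMask xs (fun w => if w = v then t w + 1 else t w) := by
  induction xs generalizing t j with
  | nil => simp [pvOccPos] at hj
  | cons x r ih =>
    by_cases hx : x = v
    · subst hx
      by_cases ht : 0 < t x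
      · rcases Nat.exists_eq_add_of_lt ht with ⟨k, hk0⟩
        have hk : t x = k + 1 := by omega
        rw [pvOccPos_cons_self, hk] at hj
        simp only [List.getElem?_cons_succ, List.getElem?_map] at hj
        rcases Option.map_eq_some_iff.mp hj with ⟨j', hj', rfl⟩
        have harg : (fun w => if w = x then t w - 1 else t w) x = k := by simp [hk]
        have hrec := ih (fun w => if w = x then t w - 1 else t w) j' (by rw [harg]; exact hj')
        rw [pvMask_cons, List.set_cons_succ, hrec, pvMask_cons]
        refine congrArg₂ List.cons ?_ ?_
        · simp [hk]
        · congr 1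
          funext w
          by_cases hw : w = x <;> simp [hw, hk]
      · have h0 : t x = 0 := Nat.eq_zero_of_not_pos ht
        rw [pvOccPos_cons_self, h0] at hj
        simp only [List.getElem?_cons_zero, Option.some.injEq] at hj
        subst hj
        rw [pvMask_cons, List.set_cons_zero, pvMask_cons]
        refine congrArg₂ List.cons ?_ ?_
        · simp
        · congr 1
          funext w
          by_cases hw : w = x <;> simp [hw, h0]
    · have hvx : ¬ v = x := fun hh => hx hh.symm
      have harg : (fun w => if w = x then t w - 1 else t w) v = t v := if_neg hvx
      rw [pvOccPos_cons_ne r hx] at hj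
      simp only [List.getElem?_map] at hj
      rcases Option.map_eq_some_iff.mp hj with ⟨j', hj', rfl⟩
      have hrec := ih (fun w => if w = x then t w - 1 else t w) j' (by rw [harg]; exact hj')
      rw [pvMask_cons, List.set_cons_succ, hrec, pvMask_cons]
      refine congrArg₂ List.cons ?_ ?_
      · rw [if_neg hx]
      · congr 1
        funext w
        by_cases hw : w = v <;> by_cases hwx : w = x <;> simp [hw, hwx, hx, hvx]

theorem pvLoopA_eq_ref (rest : List String) (ascii0 txt : List String) (t : String → Nat)
    (hne : "" ∉ rest)
    (hok : ∀ i < rest.length,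
      pvOkIdx ((pvOccPos ascii0 (rest.getD i ""))[t (rest.getD i "") + (rest.take i).count (rest.getD i "")]?) txt.length = true) :
    pvLoopA rest (pvMask ascii0 t) txt = pvRefLoop rest t ascii0 txt := by
  induction rest generalizing t with
  | nil => simp [pvLoopA, pvRefLoop]
  | cons v rest ih =>
    rw [List.mem_cons, not_or] at hne
    obtain ⟨hv0, hne'⟩ := hne
    have hv : v ≠ "" := Ne.symm hv0
    have h0 := hok 0 (by simp)
    simp only [List.getD_cons_zero, List.take_zero, List.count_nil, Nat.add_zero] at h0
    cases hcase : (pvOccPos ascii0 v)[t v]? with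
    | none => rw [hcase] at h0; simp [pvOkIdx] at h0
    | some j =>
      rw [hcase] at h0
      have hjlt : j < txt.length := by simpa [pvOkIdx] using h0
      have hA : PySem.List.index? (pvMask ascii0 t) v = some j := by rw [pvIndex_mask hv, hcase]
      have hAg : PySem.List.pyGet? txt (j : Int) = some txt[j] := by
        rw [PySem.List.pyGet?_natCast]
        exact List.getElem?_eq_getElem hjlt
      rw [pvLoopA, pvRefLoop]
      simp only [hA, hAg, hcase, List.getElem?_eq_getElem hjlt]
      refine congrArg₂ List.cons rfl ?_
      have hmask : (pvMask ascii0 t).set j "" = pvMask ascii0 (fun w => if w = v then t w + 1 else t w) :=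
        pvSet_mask hv ascii0 t j hcase
      rw [hmask]
      apply ih
      · exact hne'
      · intro i hi
        have h1 := hok (i + 1) (by simpa using Nat.succ_lt_succ hi)
        simp only [List.getD_cons_succ, List.take_succ_cons, List.count_cons] at h1
        set u := rest.getD i "" with hu
        have heq : (if u = v then t u + 1 else t u) + (rest.take i).count u
            = t u + ((rest.take i).count u + if u = v then 1 else 0) := by
          by_cases huv : u = v
          · simp [huv]
            omega
          · simp [huv]
        rw [heq]
        convert h1 using 4
        by_cases huv : u = v
        · simp [huv]
        · have huv' : ¬ v = u := fun hh => huv hh.symm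
          simp [huv, huv']

-- the reference loop written as a map over the query indices
theorem pvRefLoop_eq_map (sa : List String) (t : String → Nat) (ascii txt : List String)
    (hok : ∀ i < sa.length,
      pvOkIdx ((pvOccPos ascii (sa.getD i ""))[t (sa.getD i "") + (sa.take i).count (sa.getD i "")]?) txt.length = true) :
    pvRefLoop sa t ascii txt
      = (List.range sa.length).map (fun i =>
          match (pvOccPos ascii (sa.getD i ""))[t (sa.getD i "") + (sa.take i).count (sa.getD i "")]? with
          | some j => txt.getD j ""
          | none => "") := by
  induction sa generalizing t with
  | nil => simp [pvRefLoop]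
  | cons v r ih =>
    have h0 := hok 0 (by simp)
    simp only [List.getD_cons_zero, List.take_zero, List.count_nil, Nat.add_zero] at h0
    cases hcase : (pvOccPos ascii v)[t v]? with
    | none => rw [hcase] at h0; simp [pvOkIdx] at h0
    | some j =>
      rw [hcase] at h0
      have hjlt : j < txt.length := by simpa [pvOkIdx] using h0
      rw [pvRefLoop]
      rw [show (v :: r).length = r.length + 1 from rfl, List.range_succ_eq_map]
      rw [List.map_cons]
      simp only [hcase, List.getElem?_eq_getElem hjlt, List.map_map]
      refine congrArg₂ List.cons ?_ ?_
      · simp only [List.getD_cons_zero, List.take_zero, List.count_nil, Nat.add_zero, hcase]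
        exact (List.getD_eq_getElem txt "" hjlt).symm
      · rw [ih (fun u => if u = v then t u + 1 else t u) ?_]
        · apply List.map_congr_left
          intro i _
          simp only [Function.comp_apply, Nat.succ_eq_add_one]
          simp only [List.getD_cons_succ, List.take_succ_cons, List.count_cons]
          set u := r.getD i "" with hu
          have heq : (if u = v then t u + 1 else t u) + (r.take i).count u
              = t u + ((r.take i).count u + if u = v then 1 else 0) := by
            by_cases huv : u = v
            · simp [huv]; omega
            · simp [huv]
          rw [heq]
          congr 3
          by_cases huv : u = v
          · simp [huv]
          · have huv' : ¬ v = u := fun hh => huv hh.symm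
            simp [huv, huv']
        · intro i hi
          have h1 := hok (i + 1) (by simpa using Nat.succ_lt_succ hi)
          simp only [List.getD_cons_succ, List.take_succ_cons, List.count_cons] at h1
          set u := r.getD i "" with hu
          have heq : (if u = v then t u + 1 else t u) + (r.take i).count u
              = t u + ((r.take i).count u + if u = v then 1 else 0) := by
            by_cases huv : u = v
            · simp [huv]; omega
            · simp [huv]
          rw [heq]
          convert h1 using 4
          by_cases huv : u = v
          · simp [huv]
          · have huv' : ¬ v = u := fun hh => huv hh.symm
            simp [huv, huv']

--------------------------------------------------------------------------------
-- Stability of PySem.List.sorted: filtering by one key value commutes with sorting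
--------------------------------------------------------------------------------

theorem pvFilter_insertBy_of_ne {α : Type} (key : α → String) (p : α → Bool) (x : α)
    (acc : List α) (hx : p x = false) :
    (PySem.List.insertBy (fun a b => decide (key a < key b)) x acc).filter p = acc.filter p := by
  induction acc with
  | nil => simp [PySem.List.insertBy, hx]
  | cons y ys ih =>
    rw [show PySem.List.insertBy (fun a b => decide (key a < key b)) x (y :: ys)
        = if decide (key x < key y) then x :: y :: ys else y :: PySem.List.insertBy (fun a b => decide (key a < key b)) x ys
      from by simp [PySem.List.insertBy]]
    split
    · simp [List.filter_cons, hx]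
    · simp only [List.filter_cons]
      split <;> rw [ih]

theorem pvFilter_insertBy_of_eq {α : Type} (key : α → String) (v : String) (x : α)
    (acc : List α) (hx : key x = v) (hacc : acc.Pairwise (fun a b => key a ≤ key b)) :
    (PySem.List.insertBy (fun a b => decide (key a < key b)) x acc).filter (fun y => key y == v)
      = acc.filter (fun y => key y == v) ++ [x] := by
  induction acc with
  | nil => simp [PySem.List.insertBy, hx]
  | cons y ys ih =>
    rcases List.pairwise_cons.mp hacc with ⟨hy, hys⟩
    rw [show PySem.List.insertBy (fun a b => decide (key a < key b)) x (y :: ys)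
        = if decide (key x < key y) then x :: y :: ys else y :: PySem.List.insertBy (fun a b => decide (key a < key b)) x ys
      from by simp [PySem.List.insertBy]]
    split
    · rename_i hlt
      have hlt' : key x < key y := of_decide_eq_true hlt
      have hnil : (y :: ys).filter (fun z => key z == v) = [] := by
        rw [List.filter_eq_nil_iff]
        intro z hz
        have hzy : key y ≤ key z := by
          rcases List.mem_cons.mp hz with rfl | hz'
          · exact le_refl _
          · exact hy z hz'
        have : key x < key z := lt_of_lt_of_le hlt' hzy
        simp only [beq_iff_eq]
        intro hzv
        rw [hx] at this
        rw [hzv] at this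
        exact lt_irrefl _ this
      rw [List.filter_cons_of_pos (by simp [hx]), hnil]
      simp
    · simp only [List.filter_cons]
      split
      · rw [ih hys]
        rfl
      · exact ih hys

theorem pvSorted_filter {α : Type} (key : α → String) (v : String) (xs : List α) :
    (PySem.List.sorted xs key).filter (fun y => key y == v) = xs.filter (fun y => key y == v) := by
  induction xs using List.reverseRecOn with
  | nil => simp [PySem.List.sorted]
  | append_singleton xs x ih =>
    have hstep : PySem.List.sorted (xs ++ [x]) key
        = PySem.List.insertBy (fun a b => decide (key a < key b)) x (PySem.List.sorted xs key) := by
      rw [PySem.List.sorted_eq_foldl_insertBy, PySem.List.sorted_eq_foldl_insertBy, List.foldl_append]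
      rfl
    rw [hstep, List.filter_append]
    by_cases hx : key x = v
    · rw [pvFilter_insertBy_of_eq key v x _ hx (PySem.List.sorted_pairwise xs key), ih]
      simp [hx]
    · rw [pvFilter_insertBy_of_ne key _ x _ (by simp [hx]), ih]
      simp [hx]

theorem pvSorted_filter_snd (v : String) (xs : List (Int × String)) :
    (PySem.List.sorted xs (fun p => p.2)).filter (fun p => p.2 == v)
      = xs.filter (fun p => p.2 == v) := by
  simpa using pvSorted_filter (fun p : Int × String => p.2) v xs

theorem pvSorted_filter_fst (v : String) (xs : List (String × String)) :
    (PySem.List.sorted xs (fun p => p.1)).filter (fun p => p.1 == v)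
      = xs.filter (fun p => p.1 == v) := by
  simpa using pvSorted_filter (fun p : String × String => p.1) v xs

--------------------------------------------------------------------------------
-- The merge equals the "consume the next filtered entry per value" specification
--------------------------------------------------------------------------------

def pvUpd (ef : String → List (String × String)) (v : String) (l : List (String × String)) :
    String → List (String × String) := fun u => if u = v then l else ef u

def pvSpecGo (q : List (Int × String)) (ef : String → List (String × String)) (out : List String) :
    List String :=
  match q with
  | [] => out
  | (i, v) :: qr =>
    match ef v with
    | [] => out
    | (_, w) :: rest => pvSpecGo qr (pvUpd ef v rest) (PySem.List.pySetD out i w)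

theorem pvMerge_eq_spec (e : List (String × String)) (q : List (Int × String)) (out : List String)
    (ef : String → List (String × String))
    (Hq : q.Pairwise (fun x y => x.2 ≤ y.2))
    (He : e.Pairwise (fun x y => x.1 ≤ y.1))
    (Hef : ∀ p ∈ q, ef p.2 = e.filter (fun z => z.1 == p.2))
    (Hcnt : ∀ u, (q.filter (fun p => p.2 == u)).length ≤ (e.filter (fun z => z.1 == u)).length) :
    pvMergeB q e out = pvSpecGo q ef out := by
  induction e generalizing q out ef with
  | nil =>
    cases q with
    | nil => simp [pvMergeB, pvSpecGo]
    | cons p qr =>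
      obtain ⟨i, v⟩ := p
      have hefv : ef v = [] := by
        rw [Hef (i, v) List.mem_cons_self]
        simp
      simp [pvMergeB, pvSpecGo, hefv]
  | cons z er ih =>
    obtain ⟨a, w⟩ := z
    cases q with
    | nil => simp [pvMergeB, pvSpecGo]
    | cons p qr =>
      obtain ⟨i, v⟩ := p
      rcases List.pairwise_cons.mp Hq with ⟨hv, Hq'⟩
      rcases List.pairwise_cons.mp He with ⟨ha, He'⟩
      by_cases hlt : a < v
      · rw [show pvMergeB ((i, v) :: qr) ((a, w) :: er) out
            = pvMergeB ((i, v) :: qr) er out from by rw [pvMergeB]; simp [hlt]]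
        apply ih
        · exact Hq
        · exact He'
        · intro p hp
          have hap : a < p.2 := by
            rcases List.mem_cons.mp hp with rfl | hp'
            · exact hlt
            · exact lt_of_lt_of_le hlt (hv p hp')
          rw [Hef p hp, List.filter_cons]
          simp [show ((a, w).1 == p.2) = false from beq_eq_false_iff_ne.mpr (ne_of_lt hap)]
        · intro u
          by_cases hau : a = u
          · have hnil : (((i, v) :: qr).filter (fun p => p.2 == u)).length = 0 := by
              rw [List.length_eq_zero_iff, List.filter_eq_nil_iff]
              intro p hp
              have hap : a < p.2 := by
                rcases List.mem_cons.mp hp with rfl | hp'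
                · exact hlt
                · exact lt_of_lt_of_le hlt (hv p hp')
              simp [show (p.2 == u) = false from
                beq_eq_false_iff_ne.mpr (by rw [← hau]; exact (ne_of_lt hap).symm)]
            omega
          · have := Hcnt u
            rw [show (((a, w) :: er).filter (fun z => z.1 == u)) = er.filter (fun z => z.1 == u)
              from by simp [hau]] at this
            exact this
      · have haeq : a = v := by
          have h1 : 1 ≤ (((a, w) :: er).filter (fun z => z.1 == v)).length := by
            have h2 := Hcnt v
            have hhead : 1 ≤ (((i, v) :: qr).filter (fun p => p.2 == v)).length := by
              simp
            omega
          have hne : (((a, w) :: er).filter (fun z => z.1 == v)) ≠ [] := by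
            intro hc
            rw [hc] at h1
            simp at h1
          rcases List.exists_mem_of_ne_nil _ hne with ⟨z, hz⟩
          have hz1 : z.1 = v := by simpa using List.of_mem_filter hz
          rcases List.mem_cons.mp (List.mem_of_mem_filter hz) with rfl | hz'
          · exact hz1
          · exact le_antisymm (hz1 ▸ ha z hz') (not_lt.mp hlt)
        have hefv : ef v = (a, w) :: er.filter (fun z => z.1 == v) := by
          rw [Hef (i, v) List.mem_cons_self, List.filter_cons]
          simp [haeq]
        rw [show pvMergeB ((i, v) :: qr) ((a, w) :: er) out
            = pvMergeB qr er (PySem.List.pySetD out i w) from by rw [pvMergeB]; simp [hlt]]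
        rw [show pvSpecGo ((i, v) :: qr) ef out
            = pvSpecGo qr (pvUpd ef v (er.filter (fun z => z.1 == v))) (PySem.List.pySetD out i w)
          from by rw [pvSpecGo, hefv]]
        apply ih
        · exact Hq'
        · exact He'
        · intro p hp
          unfold pvUpd
          by_cases hpv : p.2 = v
          · rw [if_pos hpv, hpv]
          · rw [if_neg hpv, Hef p (List.mem_cons_of_mem _ hp), List.filter_cons]
            simp [show ((a, w).1 == p.2) = false from
              beq_eq_false_iff_ne.mpr (by simpa [haeq] using fun h : a = p.2 => hpv (haeq ▸ h.symm))]
        · intro u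
          have h2 := Hcnt u
          by_cases huv : u = v
          · subst huv
            simp only [List.filter_cons, haeq, beq_self_eq_true, if_true, List.length_cons] at h2
            omega
          · have hvu : (v == u) = false := beq_eq_false_iff_ne.mpr fun h => huv h.symm
            have hau : ((a, w).1 == u) = false := by
              simpa [haeq] using hvu
            simpa only [List.filter_cons, hvu, hau, Bool.false_eq_true, if_false] using h2

--------------------------------------------------------------------------------
-- Characterizing pvSpecGo's output slots
--------------------------------------------------------------------------------

theorem pvSpecGo_length (q : List (Int × String)) (ef : String → List (String × String))
    (out : List String) : (pvSpecGo q ef out).length = out.length := by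
  induction q generalizing ef out with
  | nil => rfl
  | cons p qr ih =>
    obtain ⟨i, v⟩ := p
    rw [pvSpecGo]
    cases ef v with
    | nil => rfl
    | cons z rest =>
      rw [ih, PySem.List.length_pySetD]

theorem pvSpecGo_untouched (q : List (Int × String)) (ef : String → List (String × String))
    (out : List String) (j : Nat) (h : ∀ p ∈ q, 0 ≤ p.1 ∧ p.1 ≠ (j : Int)) :
    (pvSpecGo q ef out)[j]? = out[j]? := by
  induction q generalizing ef out with
  | nil => rfl
  | cons p qr ih =>
    obtain ⟨i, v⟩ := p
    rw [pvSpecGo]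
    cases ef v with
    | nil => rfl
    | cons z rest =>
      rcases h (i, v) List.mem_cons_self with ⟨hi0, hij⟩
      rw [ih _ _ (fun p hp => h p (List.mem_cons_of_mem _ hp))]
      rw [PySem.List.pySetD_of_nonneg _ _ hi0]
      exact List.getElem?_set_ne (by omega)

theorem pvSpecGo_hit (q1 : List (Int × String)) (i : Nat) (v : String) (q2 : List (Int × String))
    (ef : String → List (String × String)) (out : List String)
    (Hpos : ∀ p ∈ q1 ++ ((i : Int), v) :: q2, 0 ≤ p.1)
    (Hnotin : ∀ p ∈ q1 ++ q2, p.1 ≠ (i : Int))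
    (Hcnt : ∀ u, ((q1 ++ ((i : Int), v) :: q2).filter (fun p => p.2 == u)).length ≤ (ef u).length)
    (hi : i < out.length) :
    (pvSpecGo (q1 ++ ((i : Int), v) :: q2) ef out)[i]?
      = ((ef v)[(q1.filter (fun p => p.2 == v)).length]?).map (fun z => z.2) := by
  induction q1 generalizing ef out with
  | nil =>
    have h1 := Hcnt v
    simp only [List.nil_append, List.filter_cons, beq_self_eq_true, if_true, List.length_cons] at h1
    cases hefv : ef v with
    | nil => rw [hefv] at h1; simp at h1
    | cons z rest =>
      obtain ⟨a, w⟩ := z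
      rw [List.nil_append, pvSpecGo, hefv]
      rw [pvSpecGo_untouched _ _ _ i
        (fun p hp => ⟨Hpos p (List.mem_cons_of_mem _ hp), Hnotin p hp⟩)]
      rw [PySem.List.pySetD_of_nonneg _ _ (by positivity), Int.toNat_natCast]
      rw [List.getElem?_set_self hi]
      simp
  | cons p q1' ih =>
    obtain ⟨i1, v1⟩ := p
    have h1 := Hcnt v1
    simp only [List.cons_append, List.filter_cons, beq_self_eq_true, if_true, List.length_cons] at h1
    cases hefv : ef v1 with
    | nil => rw [hefv] at h1; simp at h1
    | cons z rest =>
      obtain ⟨a, w⟩ := z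
      rw [List.cons_append, pvSpecGo, hefv]
      have hupd := ih (pvUpd ef v1 rest) (PySem.List.pySetD out i1 w)
        (fun p hp => Hpos p (List.mem_cons_of_mem _ hp))
        (fun p hp => Hnotin p (by
          rcases List.mem_append.mp hp with h' | h'
          · exact List.mem_append.mpr (Or.inl (List.mem_cons_of_mem _ h'))
          · exact List.mem_append.mpr (Or.inr h')))
        (fun u => by
          have h2 := Hcnt u
          by_cases huv : u = v1
          · subst huv
            simp only [List.cons_append, List.filter_cons, beq_self_eq_true, if_true,
              List.length_cons, hefv] at h2 ⊢
            unfold pvUpd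
            rw [if_pos rfl]
            omega
          · have hvu : (v1 == u) = false := beq_eq_false_iff_ne.mpr fun hh => huv hh.symm
            unfold pvUpd
            rw [if_neg (fun hh => huv hh)]
            simpa only [List.cons_append, List.filter_cons, hvu, Bool.false_eq_true, if_false] using h2)
        (by rw [PySem.List.length_pySetD]; exact hi)
      rw [hupd]
      by_cases hv1 : v1 = v
      · subst hv1
        unfold pvUpd
        rw [if_pos rfl]
        simp [hefv]
      · have hvv : ((i1, v1).2 == v) = false := beq_eq_false_iff_ne.mpr hv1
        unfold pvUpd
        rw [if_neg (fun hh => hv1 hh.symm)]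
        simp only [List.filter_cons, hvv, Bool.false_eq_true, if_false]

--------------------------------------------------------------------------------
-- Counting and occurrence facts
--------------------------------------------------------------------------------

theorem pvEnum_filter_length (sa : List String) (v : String) (s : Int) :
    ((PySem.List.enumerate sa s).filter (fun p => p.2 == v)).length = sa.count v := by
  induction sa generalizing s with
  | nil => simp [PySem.List.enumerate_nil]
  | cons x r ih =>
    rw [PySem.List.enumerate_cons, List.filter_cons, List.count_cons]
    by_cases hx : x = v
    · simp [hx, ih]
    · have : ((s, x).2 == v) = false := beq_eq_false_iff_ne.mpr hx
      simp [this, ih]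

theorem pvZipFilter_occ (ascii : List String) (txt : List String) (v : String) (k j : Nat)
    (hk : (pvOccPos ascii v)[k]? = some j) (hj : j < txt.length) :
    ((ascii.zip txt).filter (fun z => z.1 == v))[k]? = some (v, txt.getD j "") := by
  induction ascii generalizing txt k j with
  | nil => simp [pvOccPos] at hk
  | cons x r ih =>
    cases txt with
    | nil => simp at hj
    | cons w t =>
      by_cases hx : x = v
      · subst hx
        rw [pvOccPos_cons_self] at hk
        cases k with
        | zero =>
          simp only [List.getElem?_cons_zero, Option.some.injEq] at hk
          subst hk
          simp [List.zip_cons_cons]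
        | succ k' =>
          simp only [List.getElem?_cons_succ, List.getElem?_map] at hk
          rcases Option.map_eq_some_iff.mp hk with ⟨j', hj', rfl⟩
          rw [List.zip_cons_cons, List.filter_cons_of_pos (by simp)]
          rw [List.getElem?_cons_succ]
          have := ih t k' j' hj' (by simpa using hj)
          rw [this]
          simp
      · rw [pvOccPos_cons_ne r hx] at hk
        simp only [List.getElem?_map] at hk
        rcases Option.map_eq_some_iff.mp hk with ⟨j', hj', rfl⟩
        rw [List.zip_cons_cons,
          List.filter_cons_of_neg (by simp [beq_eq_false_iff_ne.mpr hx])]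
        have := ih t k j' hj' (by simpa using hj)
        rw [this]
        simp

theorem pvLast_occurrence (sa : List String) (v : String) (c : Nat) (hc : sa.count v = c + 1) :
    ∃ i, ∃ _ : i < sa.length, sa[i] = v ∧ (sa.take i).count v = c := by
  induction sa using List.reverseRecOn generalizing c with
  | nil => simp at hc
  | append_singleton r x ih =>
    by_cases hx : x = v
    · subst hx
      refine ⟨r.length, by simp, by simp, ?_⟩
      rw [List.take_left']
      · have := hc
        rw [List.count_append] at this
        simp at this
        omega
      · rfl
    · rw [List.count_append] at hc
      have hcx : List.count v [x] = 0 := by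
        simp [List.count_singleton]
        exact hx
      rcases ih c (by omega) with ⟨i, hi, hvi, hci⟩
      refine ⟨i, by simp; omega, ?_, ?_⟩
      · rw [List.getElem_append_left hi]
        exact hvi
      · rw [List.take_append_of_le_length (le_of_lt hi)]
        exact hci

theorem pvAppend_cons_unique_length {A B A' B' : List (Int × String)} {x : Int × String}
    (h : A ++ x :: B = A' ++ x :: B')
    (hA : ∀ p ∈ A, p.1 ≠ x.1) (hA' : ∀ p ∈ A', p.1 ≠ x.1) : A.length = A'.length := by
  induction A generalizing A' with
  | nil =>
    cases A' with
    | nil => rfl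
    | cons y A'' =>
      exfalso
      simp only [List.nil_append, List.cons_append, List.cons.injEq] at h
      exact hA' y List.mem_cons_self (h.1 ▸ rfl)
  | cons y A1 ih =>
    cases A' with
    | nil =>
      exfalso
      simp only [List.nil_append, List.cons_append, List.cons.injEq] at h
      exact hA y List.mem_cons_self (h.1.symm ▸ rfl)
    | cons y' A1' =>
      simp only [List.cons_append, List.cons.injEq] at h
      rw [List.length_cons, List.length_cons,
        ih h.2 (fun p hp => hA p (List.mem_cons_of_mem _ hp))
          (fun p hp => hA' p (List.mem_cons_of_mem _ hp))]

--------------------------------------------------------------------------------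
-- Putting the B side together, and the verdict
--------------------------------------------------------------------------------

theorem pvAlt_eq_ref (sa ascii txt : List String)
    (hpre : Pre_print_sort_words sa ascii txt) :
    pvMergeB (PySem.List.sorted (PySem.List.enumerate sa) (fun p => p.2))
        (PySem.List.sorted (ascii.zip txt) (fun p => p.1)) (List.replicate sa.length "")
      = pvRefLoop sa (fun _ => 0) ascii txt := by
  obtain ⟨hne, hok⟩ := hpre
  set Q := PySem.List.sorted (PySem.List.enumerate sa) (fun p => p.2) with hQ
  set E := PySem.List.sorted (ascii.zip txt) (fun p => p.1) with hE
  -- global count bound: each value is queried at most as often as it has usable entries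
  have hcnt0 : ∀ u, (Q.filter (fun p => p.2 == u)).length ≤ (E.filter (fun z => z.1 == u)).length := by
    intro u
    rw [hQ, pvSorted_filter_snd u, hE, pvSorted_filter_fst u,
      pvEnum_filter_length sa u 0]
    cases hc : sa.count u with
    | zero => omega
    | succ c =>
      rcases pvLast_occurrence sa u c hc with ⟨i, hi, hvi, hci⟩
      have h0 := hok i hi
      rw [List.getD_eq_getElem sa "" hi, hvi, hci] at h0
      cases hocc : (pvOccPos ascii u)[c]? with
      | none => rw [hocc] at h0; simp [pvOkIdx] at h0
      | some j =>
        rw [hocc] at h0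
        have hj : j < txt.length := by simpa [pvOkIdx] using h0
        have := pvZipFilter_occ ascii txt u c j hocc hj
        have hlen : c < ((ascii.zip txt).filter (fun z => z.1 == u)).length :=
          (List.getElem?_eq_some_iff.mp this).choose
        omega
  have hQpos : ∀ p ∈ Q, 0 ≤ p.1 := by
    intro p hp
    rw [hQ, PySem.List.mem_sorted] at hp
    rcases (PySem.List.mem_enumerate_iff _ _ _).mp hp with ⟨k, hk, rfl⟩
    simp
  have hQnodup : (Q.map (fun p => p.1)).Nodup := by
    have hperm : (Q.map (fun p => p.1)).Perm ((PySem.List.enumerate sa).map (fun p => p.1)) :=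
      (PySem.List.sorted_perm (PySem.List.enumerate sa) (fun p => p.2) false).map _
    have : ((PySem.List.enumerate sa).map (fun p => p.1)).Nodup := by
      have hmf := PySem.List.map_fst_enumerate sa (0 : Int)
      simp only [show (fun p : Int × String => p.1) = Prod.fst from rfl]
      rw [hmf]
      exact PySem.List.nodup_pyRange_one 0 _
    exact this.perm hperm.symm
  -- both sides as a map over query indices
  rw [pvRefLoop_eq_map sa (fun _ => 0) ascii txt (by intro i hi; simpa using hok i hi)]
  rw [pvMerge_eq_spec E Q (List.replicate sa.length "") (fun v => E.filter (fun z => z.1 == v))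
    (PySem.List.sorted_pairwise _ _) (PySem.List.sorted_pairwise _ _) (fun p _ => rfl) hcnt0]
  apply List.ext_getElem?
  intro j
  by_cases hj : j < sa.length
  swap
  · rw [List.getElem?_eq_none, List.getElem?_eq_none]
    · simpa using hj
    · rw [pvSpecGo_length, List.length_replicate]
      omega
  · -- decompose Q around the query with slot j
    have hmem : ((j : Int), sa[j]) ∈ Q := by
      rw [hQ, PySem.List.mem_sorted]
      exact (PySem.List.mem_enumerate_iff _ _ _).mpr ⟨j, hj, by simp⟩
    rcases List.append_of_mem hmem with ⟨q1, q2, hsplit⟩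
    have hmapf : Q.map (fun p => p.1) = q1.map (fun p => p.1) ++ (j : Int) :: q2.map (fun p => p.1) := by
      rw [hsplit]
      simp
    have hnotin1 : ∀ p ∈ q1, p.1 ≠ (j : Int) := by
      intro p hp hpj
      have := hQnodup
      rw [hmapf] at this
      rcases List.nodup_append.mp this with ⟨-, -, hdisj⟩
      exact hdisj _ (List.mem_map.mpr ⟨p, hp, hpj⟩) _ List.mem_cons_self rfl
    have hnotin2 : ∀ p ∈ q2, p.1 ≠ (j : Int) := by
      intro p hp hpj
      have := hQnodup
      rw [hmapf] at this
      rcases List.nodup_append.mp this with ⟨-, hcons, -⟩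
      rcases List.nodup_cons.mp hcons with ⟨hjq2, -⟩
      exact hjq2 (List.mem_map.mpr ⟨p, hp, hpj⟩)
    have hhit := pvSpecGo_hit q1 j sa[j] q2 (fun v => E.filter (fun z => z.1 == v))
      (List.replicate sa.length "")
      (by rw [← hsplit]; exact hQpos)
      (by
        intro p hp
        rcases List.mem_append.mp hp with h' | h'
        · exact hnotin1 p h'
        · exact hnotin2 p h')
      (by rw [← hsplit]; exact hcnt0)
      (by rw [List.length_replicate]; exact hj)
    rw [← hsplit] at hhit
    rw [hhit]
    -- the rank of slot j equals the number of earlier queries with the same value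
    have hrank : (q1.filter (fun p => p.2 == sa[j])).length = (sa.take j).count sa[j] := by
      have hQf : Q.filter (fun p => p.2 == sa[j])
          = q1.filter (fun p => p.2 == sa[j]) ++ ((j : Int), sa[j]) :: q2.filter (fun p => p.2 == sa[j]) := by
        rw [hsplit, List.filter_append, List.filter_cons_of_pos (by simp)]
      have hdecomp : sa = sa.take j ++ sa[j] :: sa.drop (j + 1) := by
        conv_lhs => rw [← List.take_append_drop j sa, List.drop_eq_getElem_cons hj]
      have hEf : Q.filter (fun p => p.2 == sa[j])
          = (PySem.List.enumerate (sa.take j) 0).filter (fun p => p.2 == sa[j])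
            ++ ((j : Int), sa[j]) :: (PySem.List.enumerate (sa.drop (j + 1)) (j + 1)).filter (fun p => p.2 == sa[j]) := by
        rw [hQ, pvSorted_filter_snd sa[j]]
        have henum : PySem.List.enumerate sa
            = PySem.List.enumerate (sa.take j ++ sa[j] :: sa.drop (j + 1)) :=
          congrArg (fun l => PySem.List.enumerate l) hdecomp
        rw [henum, PySem.List.enumerate_append, PySem.List.enumerate_cons, List.filter_append,
          List.filter_cons_of_pos (by simp)]
        rw [List.length_take_of_le (le_of_lt hj)]
        norm_num
      have huniq := pvAppend_cons_unique_length (hQf.symm.trans hEf)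
        (fun p hp => hnotin1 p (List.mem_of_mem_filter hp))
        (fun p hp => by
          rcases (PySem.List.mem_enumerate_iff _ _ _).mp (List.mem_of_mem_filter hp) with ⟨k, hk, rfl⟩
          have : k < j := by simpa [List.length_take_of_le (le_of_lt hj)] using hk
          simp only [ne_eq]
          intro hc
          omega)
      rw [huniq, pvEnum_filter_length]
    rw [hrank]
    -- the entry consumed for slot j is the k-th surviving occurrence of its value
    have h0 := hok j hj
    rw [List.getD_eq_getElem sa "" hj] at h0
    cases hocc : (pvOccPos ascii sa[j])[(sa.take j).count sa[j]]? with
    | none => rw [hocc] at h0; simp [pvOkIdx] at h0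
    | some jj =>
      rw [hocc] at h0
      have hjj : jj < txt.length := by simpa [pvOkIdx] using h0
      rw [hE]
      show (Option.map (fun z => z.2)
        (((PySem.List.sorted (ascii.zip txt) (fun p => p.1)).filter
          (fun z => z.1 == sa[j]))[(sa.take j).count sa[j]]?)) = _
      rw [pvSorted_filter_fst sa[j], pvZipFilter_occ ascii txt sa[j] _ jj hocc hjj]
      rw [List.getElem?_map, List.getElem?_range hj]
      simp only [Option.map_some]
      rw [List.getD_eq_getElem sa "" hj]
      simp only [Nat.zero_add]
      rw [hocc]

-- ===== VERDICT (by name: the statement is the Claim_ definition above) =====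
theorem print_sort_words_spec : Claim_equal_print_sort_words := by
  intro sa ascii txt _ hpre
  obtain ⟨hne, hok⟩ := hpre
  unfold Spec_print_sort_words print_sort_words print_sort_words_alt
  refine Eq.symm (congrArg (PySem.Str.join " ") ?_)
  have hB := pvAlt_eq_ref sa ascii txt ⟨hne, hok⟩
  have hA := pvLoopA_eq_ref sa ascii txt (fun _ => 0) hne
    (by intro i hi; simpa using hok i hi)
  rw [pvMask_zero] at hA
  simpa [hA] using hB
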